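-- pv_equiv track=rewrite | github.com/AndreFreire/DecisionTree | decisiontree/id3_algorithm.py | _get_attribute_samples_count
-- ===== SOURCE A (Python) =====
-- POSITIVE_INDEX = 'positive'
--
-- NEGATIVE_INDEX = 'negative'
--
-- def _get_attribute_samples_count(
--         attribute_index, file_data, positive_flag, decision_index
-- ):
--     initial_value = {
--         POSITIVE_INDEX: 0,
--         NEGATIVE_INDEX: 0,
--     }
--     attribute_values = [value[attribute_index] for value in file_data]
--     attribute_data = {}
--     for attribute in attribute_values:
--         attribute_data[attribute] = initial_value.copy()
--
--     for line in file_data: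
--         if line[decision_index] == positive_flag:
--             attribute_data[line[attribute_index]][POSITIVE_INDEX] += 1
--         else:
--             attribute_data[line[attribute_index]][NEGATIVE_INDEX] += 1
--     return attribute_data
-- ===== SOURCE B (Python) =====
-- POSITIVE_INDEX = 'positive'
--
-- NEGATIVE_INDEX = 'negative'
--
--
-- def _get_attribute_samples_count(
--         attribute_index, file_data, positive_flag, decision_index
-- ):
--     # group lines by attribute value, then aggregate each group
--     groups = {}
--     for line in file_data:
--         groups.setdefault(line[attribute_index], []).append(line)
--     result = {}
--     for value, lines in groups.items():
--         positives = sum(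
--             1 for line in lines if line[decision_index] == positive_flag
--         )
--         result[value] = {
--             POSITIVE_INDEX: positives,
--             NEGATIVE_INDEX: len(lines) - positives,
--         }
--     return result
-- ===== Notes on version B (the rewrite author's own statement) =====
-- stated objective: alternative
-- what changed: B groups the lines by attribute value in one pass (setdefault/append) and then aggregates each group, computing positives by a filtered sum and negatives as group size minus positives, instead of A's pre-seeding every key with a zero dict and branch-incrementing per line.
import Mathlib
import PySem

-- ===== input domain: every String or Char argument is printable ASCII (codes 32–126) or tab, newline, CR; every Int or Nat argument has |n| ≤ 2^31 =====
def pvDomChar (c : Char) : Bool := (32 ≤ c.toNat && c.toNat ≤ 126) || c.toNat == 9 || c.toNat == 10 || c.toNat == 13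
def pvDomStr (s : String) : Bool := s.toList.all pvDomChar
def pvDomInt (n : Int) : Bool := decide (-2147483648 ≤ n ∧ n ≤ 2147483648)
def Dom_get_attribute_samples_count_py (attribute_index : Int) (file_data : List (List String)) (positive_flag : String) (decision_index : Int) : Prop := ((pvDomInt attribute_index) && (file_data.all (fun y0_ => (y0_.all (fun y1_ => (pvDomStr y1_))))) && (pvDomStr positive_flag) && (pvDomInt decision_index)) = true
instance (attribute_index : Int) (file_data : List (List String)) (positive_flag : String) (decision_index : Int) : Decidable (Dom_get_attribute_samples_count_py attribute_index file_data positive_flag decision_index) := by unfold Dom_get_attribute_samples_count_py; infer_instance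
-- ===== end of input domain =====

-- B groups the lines by attribute value in one pass and then aggregates each group
-- (positives by a filtered count, negatives as group size minus positives), instead of
-- A's pre-seeding every key with a zero dict and branch-incrementing per line.

-- ===== PORT A =====
-- initial_value = {'positive': 0, 'negative': 0}
def pvInit : PySem.Dict String Int := PySem.Dict.ofList [("positive", 0), ("negative", 0)]

def get_attribute_samples_count_py (attribute_index : Int) (file_data : List (List String)) (positive_flag : String) (decision_index : Int) : List (String × List (String × Int)) :=
  let attribute_values := file_data.map (fun value => PySem.List.pyGetD value attribute_index "")
  let attribute_data : PySem.Dict String (PySem.Dict String Int) :=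
    attribute_values.foldl (fun d attr => d.insert attr pvInit) PySem.Dict.empty
  let attribute_data := file_data.foldl (fun d line =>
    if PySem.List.pyGetD line decision_index "" == positive_flag then
      d.modify (PySem.List.pyGetD line attribute_index "") pvInit (fun inn => inn.modify "positive" 0 (· + 1))
    else
      d.modify (PySem.List.pyGetD line attribute_index "") pvInit (fun inn => inn.modify "negative" 0 (· + 1))) attribute_data
  attribute_data.items.map (fun p => (p.1, p.2.items))

-- ===== PORT B =====
def get_attribute_samples_count_py_alt (attribute_index : Int) (file_data : List (List String)) (positive_flag : String) (decision_index : Int) : List (String × List (String × Int)) :=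
  let groups : PySem.Dict String (List (List String)) :=
    file_data.foldl (fun g line =>
      g.modify (PySem.List.pyGetD line attribute_index "") [] (fun ls => ls ++ [line])) PySem.Dict.empty
  groups.items.map (fun p =>
    let positives : Int :=
      (p.2.map (fun line => if PySem.List.pyGetD line decision_index "" == positive_flag then (1 : Int) else 0)).sum
    (p.1, [("positive", positives), ("negative", (p.2.length : Int) - positives)]))

-- ===== PRECONDITION & SPEC =====
-- Pre_ excludes exactly the inputs where the Python raises IndexError: some line of
-- file_data does not admit attribute_index or decision_index as an index.
def Pre_get_attribute_samples_count_py (attribute_index : Int) (file_data : List (List String)) (positive_flag : String) (decision_index : Int) : Prop :=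
  ∀ line ∈ file_data, PySem.Raise.InRange line.length attribute_index ∧ PySem.Raise.InRange line.length decision_index
instance (attribute_index : Int) (file_data : List (List String)) (positive_flag : String) (decision_index : Int) : Decidable (Pre_get_attribute_samples_count_py attribute_index file_data positive_flag decision_index) := by unfold Pre_get_attribute_samples_count_py; infer_instance

def pvWitness_get_attribute_samples_count_py : Int × List (List String) × String × Int :=
  (0, [["a", "y"], ["b", "n"], ["a", "y"]], "y", 1)

def Spec_get_attribute_samples_count_py (attribute_index : Int) (file_data : List (List String)) (positive_flag : String) (decision_index : Int) (out : List (String × List (String × Int))) : Prop := out = get_attribute_samples_count_py_alt attribute_index file_data positive_flag decision_index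
instance (attribute_index : Int) (file_data : List (List String)) (positive_flag : String) (decision_index : Int) (out : List (String × List (String × Int))) : Decidable (Spec_get_attribute_samples_count_py attribute_index file_data positive_flag decision_index out) := by unfold Spec_get_attribute_samples_count_py; infer_instance

-- ===== CLAIM (what is proved, stated in full; the proofs are below) =====
def Claim_equal_get_attribute_samples_count_py : Prop := ∀ (attribute_index : Int) (file_data : List (List String)) (positive_flag : String) (decision_index : Int), Dom_get_attribute_samples_count_py attribute_index file_data positive_flag decision_index → Pre_get_attribute_samples_count_py attribute_index file_data positive_flag decision_index → Spec_get_attribute_samples_count_py attribute_index file_data positive_flag decision_index (get_attribute_samples_count_py attribute_index file_data positive_flag decision_index)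

-- ===== LEMMAS AND PROOFS =====

-- abbreviations used only by the proofs
def pvKey (ai : Int) (line : List String) : String := PySem.List.pyGetD line ai ""
def pvIsPos (di : Int) (flag : String) (line : List String) : Bool :=
  PySem.List.pyGetD line di "" == flag
-- a two-entry {'positive': x, 'negative': y} dict
def pvD2 (x y : Int) : PySem.Dict String Int := PySem.Dict.mk [("positive", x), ("negative", y)]
-- the inner update A performs on the counted line's dict
def pvStepInn (di : Int) (flag : String) (line : List String) (inn : PySem.Dict String Int) : PySem.Dict String Int :=
  if pvIsPos di flag line then inn.modify "positive" 0 (· + 1) else inn.modify "negative" 0 (· + 1)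

lemma pvD2_modify_pos (x y : Int) : (pvD2 x y).modify "positive" 0 (· + 1) = pvD2 (x + 1) y := rfl
lemma pvD2_modify_neg (x y : Int) : (pvD2 x y).modify "negative" 0 (· + 1) = pvD2 x (y + 1) := rfl

-- the seed loop stores pvInit everywhere, so every lookup with default pvInit is pvInit
lemma pvSeed_getD (m : List String) (d : PySem.Dict String (PySem.Dict String Int))
    (h : ∀ c, d.getD c pvInit = pvInit) (c : String) :
    (m.foldl (fun d attr => d.insert attr pvInit) d).getD c pvInit = pvInit := by
  induction m generalizing d with
  | nil => exact h c
  | cons a m ih =>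
      simp only [List.foldl_cons]
      refine ih _ (fun c' => ?_)
      rw [PySem.Dict.getD_insert]
      split <;> simp [h]

-- the counting loop, read at one key: it folds pvStepInn over the lines of that key
lemma pvAloop_getD (ai di : Int) (flag : String) (l : List (List String))
    (d : PySem.Dict String (PySem.Dict String Int)) (c : String) :
    ((l.foldl (fun d line => d.modify (pvKey ai line) pvInit (pvStepInn di flag line)) d).getD c pvInit)
      = (l.filter (fun line => pvKey ai line == c)).foldl
          (fun inn line => pvStepInn di flag line inn) (d.getD c pvInit) := by
  induction l generalizing d with
  | nil => rfl
  | cons a l ih =>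
      simp only [List.foldl_cons, List.filter_cons]
      rw [ih]
      by_cases h : pvKey ai a = c
      · simp [h]
      · have hb : (pvKey ai a == c) = false := by simp [h]
        simp [hb, PySem.Dict.getD_modify, Ne.symm h]

-- folding the inner update over a list of lines adds the two counts
lemma pvInnerFold (di : Int) (flag : String) (l : List (List String)) (x y : Int) :
    l.foldl (fun inn line => pvStepInn di flag line inn) (pvD2 x y)
      = pvD2 (x + (l.countP (pvIsPos di flag) : Int))
             (y + (l.countP (fun line => !pvIsPos di flag line) : Int)) := by
  induction l generalizing x y with
  | nil => simp [pvD2]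
  | cons a l ih =>
      by_cases h : pvIsPos di flag a
      · have hh : pvStepInn di flag a (pvD2 x y) = pvD2 (x + 1) y := by
          simp [pvStepInn, h, pvD2_modify_pos]
        rw [List.foldl_cons, hh, ih]
        simp only [List.countP_cons, h, pvD2, Bool.not_true]
        norm_num; ring
      · have hh : pvStepInn di flag a (pvD2 x y) = pvD2 x (y + 1) := by
          simp [pvStepInn, h, pvD2_modify_neg]
        rw [List.foldl_cons, hh, ih]
        simp only [List.countP_cons, h, pvD2, Bool.not_false]
        norm_num; ring

-- updating a set with elements it already contains changes nothing
lemma pvUpdate_absorb (m : List String) :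
    PySem.Set.update (PySem.Set.ofList m) m = PySem.Set.ofList m := by
  have h0 : List.filter (fun y => !(PySem.Set.ofList m).contains y) (PySem.Set.ofList m) = [] := by
    rw [List.filter_eq_nil_iff]
    intro a ha
    simp only [PySem.Set.mem_ofList] at ha
    simp [ha]
  rw [PySem.Set.update_eq_append_filter, h0, List.append_nil]

-- B's grouping loop, read at one key, is the filter of file_data at that key
lemma pvGroups_getD (ai : Int) (l : List (List String)) (c : String) :
    ((l.foldl (fun g line => g.modify (pvKey ai line) [] (fun ls => ls ++ [line])) PySem.Dict.empty).getD c [])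
      = l.filter (fun line => pvKey ai line == c) := by
  have h1 : l.foldl (fun g line => g.modify (pvKey ai line) [] (fun ls => ls ++ [line])) PySem.Dict.empty
      = (l.map (fun line => (pvKey ai line, line))).foldl
          (fun g p => g.modify p.1 [] (fun ls => ls ++ [p.2])) PySem.Dict.empty := by
    rw [List.foldl_map]
  rw [h1, PySem.Dict.getD_foldl_modify_append]
  simp [List.filter_map, Function.comp_def]

-- counting the complement: countP p + countP (!p) = length
lemma pvCount_split (p : List String → Bool) (l : List (List String)) :
    (l.length : Int) - (l.countP p : Int) = (l.countP (fun x => !p x) : Int) := by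
  induction l with
  | nil => simp
  | cons a l ih =>
      by_cases h : p a <;> simp [h] <;> omega

-- ===== VERDICT (by name: the statement is the Claim_ definition above) =====
theorem get_attribute_samples_count_py_spec : Claim_equal_get_attribute_samples_count_py := by
  intro ai fd flag di _ _
  unfold Spec_get_attribute_samples_count_py
  unfold get_attribute_samples_count_py get_attribute_samples_count_py_alt
  simp only []
  -- names for the two loops
  set m : List String := fd.map (fun value => PySem.List.pyGetD value ai "") with hm
  -- rewrite A's counting step into the modify-with-key shape
  have hstep : (fun (d : PySem.Dict String (PySem.Dict String Int)) line =>
      if PySem.List.pyGetD line di "" == flag then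
        d.modify (PySem.List.pyGetD line ai "") pvInit (fun inn => inn.modify "positive" 0 (· + 1))
      else
        d.modify (PySem.List.pyGetD line ai "") pvInit (fun inn => inn.modify "negative" 0 (· + 1)))
      = (fun d line => d.modify (pvKey ai line) pvInit (pvStepInn di flag line)) := by
    funext d line
    delta pvStepInn pvIsPos pvKey
    by_cases h : PySem.List.pyGetD line di "" == flag <;> simp [h]
  rw [hstep]
  -- the seed dict
  set S : PySem.Dict String (PySem.Dict String Int) :=
    m.foldl (fun d attr => d.insert attr pvInit) PySem.Dict.empty with hS
  set T : PySem.Dict String (PySem.Dict String Int) :=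
    fd.foldl (fun d line => d.modify (pvKey ai line) pvInit (pvStepInn di flag line)) S with hT
  set G : PySem.Dict String (List (List String)) :=
    fd.foldl (fun g line => g.modify (pvKey ai line) [] (fun ls => ls ++ [line])) PySem.Dict.empty with hG
  -- B's loop is literally G (match the lambda shapes)
  have hGalt : fd.foldl (fun g line =>
      g.modify (PySem.List.pyGetD line ai "") [] (fun ls => ls ++ [line])) PySem.Dict.empty = G := rfl
  rw [hGalt]
  -- key lists
  have hmkey : fd.map (pvKey ai) = m := rfl
  have hSkeys : S.keys = PySem.Set.ofList m := by
    rw [hS, PySem.Dict.keys_foldl_insert m (fun _ _ => pvInit) PySem.Dict.empty]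
    simpa using PySem.Set.update_nil_left m
  have hTkeys : T.keys = PySem.Set.ofList m := by
    rw [hT, PySem.Dict.keys_foldl_modify_key fd (pvKey ai) pvInit (fun _ line => pvStepInn di flag line) S,
        hmkey, hSkeys, pvUpdate_absorb]
  have hGkeys : G.keys = PySem.Set.ofList m := by
    rw [hG, PySem.Dict.keys_foldl_modify_key fd (pvKey ai) [] (fun _ line ls => ls ++ [line]) PySem.Dict.empty,
        hmkey]
    simpa using PySem.Set.update_nil_left m
  have hTnodup : T.keys.Nodup := by rw [hTkeys]; exact PySem.Set.nodup_ofList m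
  have hGnodup : G.keys.Nodup := by rw [hGkeys]; exact PySem.Set.nodup_ofList m
  rw [PySem.Dict.items_eq_map_keys T hTnodup pvInit, PySem.Dict.items_eq_map_keys G hGnodup [],
      hTkeys, hGkeys, List.map_map, List.map_map]
  refine List.map_congr_left (fun c _ => ?_)
  -- evaluate both sides at key c
  have hSgd : S.getD c pvInit = pvInit := by
    rw [hS]; exact pvSeed_getD m PySem.Dict.empty (fun _ => rfl) c
  have hTgd : T.getD c pvInit
      = pvD2 ((fd.filter (fun line => pvKey ai line == c)).countP (pvIsPos di flag) : Int)
             ((fd.filter (fun line => pvKey ai line == c)).countP (fun line => !pvIsPos di flag line) : Int) := by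
    rw [hT, pvAloop_getD, hSgd]
    have : pvInit = pvD2 0 0 := rfl
    rw [this, pvInnerFold]
    simp
  have hGgd : G.getD c [] = fd.filter (fun line => pvKey ai line == c) := by
    rw [hG]; exact pvGroups_getD ai fd c
  simp only [Function.comp_apply, hTgd, hGgd]
  -- the per-key pair
  rw [PySem.List.sum_map_ite_one_zero (fun line => PySem.List.pyGetD line di "" == flag)]
  have hpv : (fun line => PySem.List.pyGetD line di "" == flag) = pvIsPos di flag := rfl
  rw [hpv, ← pvCount_split (pvIsPos di flag)]
  rfl
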